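-- pv_equiv track=rewrite | github.com/Rothfeld/crimsonforge | utils/text_search.py | match_prefilter
-- ===== SOURCE A (Python) =====
-- def match_prefilter(query_tokens: list[str],
--                     corpus_tokens: set[str]) -> bool:
--     """Fast inner predicate for already-tokenized inputs.
--
--     Returns True when every token in ``query_tokens`` is a prefix of
--     at least one token in ``corpus_tokens``. The caller is responsible
--     for deciding what an empty query / empty corpus should mean —
--     this function says ``True`` for an empty query (no constraints)
--     and ``False`` for a non-empty query against an empty corpus.
--     """
--     if not query_tokens:
--         return True
--     if not corpus_tokens:
--         return False
--     for qt in query_tokens: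
--         for ct in corpus_tokens:
--             if ct.startswith(qt):
--                 break
--         else:
--             return False
--     return True
-- ===== SOURCE B (Python) =====
-- def match_prefilter(query_tokens, corpus_tokens):
--     # Sort the corpus once; all corpus tokens having qt as a prefix are
--     # contiguous in sorted order starting at qt's insertion point, so one
--     # binary search per query token replaces the inner scan.
--     if not query_tokens:
--         return True
--     sc = sorted(corpus_tokens)
--     for qt in query_tokens:
--         lo, hi = 0, len(sc)
--         while lo < hi:
--             mid = (lo + hi) // 2
--             if sc[mid] < qt:
--                 lo = mid + 1
--             else:
--                 hi = mid
--         if lo == len(sc) or not sc[lo].startswith(qt):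
--             return False
--     return True
-- ===== Notes on version B (the rewrite author's own statement) =====
-- stated objective: alternative
-- what changed: B sorts the corpus once and answers each query token with a binary search (tokens sharing a prefix are contiguous in sorted order, starting at the prefix's insertion point), replacing A's inner linear scan of the corpus per query token.
import Mathlib
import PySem

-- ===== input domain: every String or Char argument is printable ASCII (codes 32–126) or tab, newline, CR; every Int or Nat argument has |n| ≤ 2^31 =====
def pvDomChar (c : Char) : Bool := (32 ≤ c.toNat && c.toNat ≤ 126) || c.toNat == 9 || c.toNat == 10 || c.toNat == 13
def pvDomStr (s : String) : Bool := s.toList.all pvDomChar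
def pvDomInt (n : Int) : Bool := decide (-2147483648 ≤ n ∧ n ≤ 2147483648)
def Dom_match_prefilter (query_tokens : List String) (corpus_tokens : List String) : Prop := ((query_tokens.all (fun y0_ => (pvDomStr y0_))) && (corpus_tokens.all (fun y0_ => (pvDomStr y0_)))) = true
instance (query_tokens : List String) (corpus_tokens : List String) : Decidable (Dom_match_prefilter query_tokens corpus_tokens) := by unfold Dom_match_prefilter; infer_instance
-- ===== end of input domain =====

-- B sorts the corpus once and replaces A's inner linear scan by one binary
-- search per query token (objective: alternative algorithm; tokens with a given
-- prefix are contiguous in sorted order, starting at the prefix's insertion point).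

-- ===== PORT A =====
-- 'for ct in corpus: if ct.startswith(qt): break / else: return False' over all qt = all/any
def match_prefilter (query_tokens : List String) (corpus_tokens : List String) : Bool :=
  if query_tokens.isEmpty then true
  else if corpus_tokens.isEmpty then false
  else query_tokens.all (fun qt => corpus_tokens.any (fun ct => PySem.Str.startswith ct qt))

-- ===== PORT B =====
-- the hand-written 'lo/hi' loop in Source B is exactly bisect_left = PySem.List.bisectLeft
def match_prefilter_alt (query_tokens : List String) (corpus_tokens : List String) : Bool :=
  if query_tokens.isEmpty then true
  else
    let sc := PySem.List.sorted corpus_tokens (fun s => s)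
    query_tokens.all (fun qt =>
      match sc[PySem.List.bisectLeft sc qt]? with
      | some t => PySem.Str.startswith t qt
      | none => false)

-- ===== PRECONDITION & SPEC =====
def Spec_match_prefilter (query_tokens : List String) (corpus_tokens : List String) (out : Bool) : Prop := out = match_prefilter_alt query_tokens corpus_tokens
instance (query_tokens : List String) (corpus_tokens : List String) (out : Bool) : Decidable (Spec_match_prefilter query_tokens corpus_tokens out) := by unfold Spec_match_prefilter; infer_instance

-- ===== CLAIM (what is proved, stated in full; the proofs are below) =====
def Claim_equal_match_prefilter : Prop := ∀ (query_tokens : List String) (corpus_tokens : List String), Dom_match_prefilter query_tokens corpus_tokens → Spec_match_prefilter query_tokens corpus_tokens (match_prefilter query_tokens corpus_tokens)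

-- ===== LEMMAS AND PROOFS =====

-- (a::p) ≤ (b::x) in code-point lex order, unfolded one step
theorem pv_consLe (a b : Char) (p x : List Char) : (a::p) ≤ (b::x) ↔ a < b ∨ (a = b ∧ p ≤ x) := by
  rw [le_iff_lt_or_eq, List.cons_lt_cons_iff]
  constructor
  · rintro ((h|⟨rfl,h⟩)|h)
    · exact Or.inl h
    · exact Or.inr ⟨rfl, le_of_lt h⟩
    · injection h with h1 h2; exact Or.inr ⟨h1, le_of_eq h2⟩
  · rintro (h|⟨rfl,h⟩)
    · exact Or.inl (Or.inl h)
    · rcases lt_or_eq_of_le h with h|rfl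
      · exact Or.inl (Or.inr ⟨rfl, h⟩)
      · exact Or.inr rfl

-- a prefix is a lex lower bound
theorem pv_prefix_le (p x : List Char) (h : p <+: x) : p ≤ x := by
  rcases h with ⟨t, rfl⟩
  induction p with
  | nil =>
    cases t with
    | nil => exact le_refl _
    | cons b t => exact le_of_lt (List.nil_lt_cons b t)
  | cons a p ih => exact (pv_consLe _ _ _ _).mpr (Or.inr ⟨rfl, ih⟩)

-- a lex interval below a word with prefix p consists of words with prefix p
theorem pv_prefix_of_between (p : List Char) : ∀ (x y : List Char),
    p ≤ x → x ≤ y → p <+: y → p <+: x := by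
  induction p with
  | nil => intro x y _ _ _; exact List.nil_prefix
  | cons a p ih =>
    intro x y h1 h2 h3
    cases y with
    | nil => exact absurd (List.prefix_nil.mp h3) (by simp)
    | cons b y' =>
      obtain ⟨rfl, hp⟩ := List.cons_prefix_cons.mp h3
      cases x with
      | nil =>
        rcases le_iff_lt_or_eq.mp h1 with h|h
        · exact absurd h (List.not_lt_nil _)
        · simp at h
      | cons c x' =>
        rcases (pv_consLe _ _ _ _).mp h1 with h|⟨rfl,h1'⟩
        · rcases (pv_consLe _ _ _ _).mp h2 with h'|⟨heq,_⟩
          · exact absurd (h.trans h') (lt_irrefl a)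
          · exact absurd (heq ▸ h) (lt_irrefl a)
        · rcases (pv_consLe _ _ _ _).mp h2 with h'|⟨_,h2'⟩
          · exact absurd h' (lt_irrefl a)
          · exact List.cons_prefix_cons.mpr ⟨rfl, ih _ _ h1' h2' hp⟩

-- bisectLeft's loop invariant on a sorted List String (PySem states it for Int only)
theorem pv_bisectLoop_spec (xs : List String) (x : String) (hs : List.Pairwise (· ≤ ·) xs) :
    ∀ (fuel lo hi : Nat), lo ≤ hi → hi ≤ xs.length → hi - lo ≤ fuel →
    (∀ j (hj : j < xs.length), j < lo → xs[j] < x) →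
    (∀ j (hj : j < xs.length), hi ≤ j → x ≤ xs[j]) →
    PySem.List.bisectLeftLoop xs x fuel lo hi ≤ xs.length ∧
    (∀ j (hj : j < xs.length), j < PySem.List.bisectLeftLoop xs x fuel lo hi → xs[j] < x) ∧
    (∀ j (hj : j < xs.length), PySem.List.bisectLeftLoop xs x fuel lo hi ≤ j → x ≤ xs[j]) := by
  intro fuel
  induction fuel with
  | zero =>
    intro lo hi hlh hhl hf hlow hhigh
    simp only [PySem.List.bisectLeftLoop]
    have : lo = hi := by omega
    subst this
    exact ⟨by omega, hlow, hhigh⟩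
  | succ fuel ih =>
    intro lo hi hlh hhl hf hlow hhigh
    by_cases hlt : lo < hi
    · have hmid : (lo + hi) / 2 < xs.length := by omega
      have hx : xs[(lo + hi) / 2]? = some xs[(lo + hi) / 2] := by
        simp [List.getElem?_eq_getElem hmid]
      have hmono : ∀ i j (hi' : i < xs.length) (hj' : j < xs.length), i ≤ j → xs[i] ≤ xs[j] := by
        intro i j hi' hj' hij
        rcases Nat.lt_or_ge i j with h|h
        · exact (List.pairwise_iff_getElem.mp hs) i j hi' hj' h
        · have : i = j := by omega
          subst this; exact le_refl _
      simp only [PySem.List.bisectLeftLoop, if_pos hlt, hx]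
      by_cases hc : xs[(lo + hi) / 2] < x
      · simp only [if_pos hc]
        exact ih ((lo + hi) / 2 + 1) hi (by omega) hhl (by omega)
          (fun j hj hjl => lt_of_le_of_lt (hmono j ((lo+hi)/2) hj hmid (by omega)) hc) hhigh
      · simp only [if_neg hc]
        have hxm : x ≤ xs[(lo + hi) / 2] := le_of_not_gt hc
        exact ih lo ((lo + hi) / 2) (by omega) (by omega) (by omega) hlow
          (fun j hj hjl => le_trans hxm (hmono ((lo+hi)/2) j hmid hj hjl))
    · simp only [PySem.List.bisectLeftLoop, if_neg hlt]
      have : lo = hi := by omega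
      subst this
      cases fuel <;> exact ⟨by omega, hlow, hhigh⟩

-- the heart: the inner linear scan of A equals B's binary-search probe
theorem pv_any_eq_probe (corpus_tokens : List String) (qt : String) :
    corpus_tokens.any (fun ct => PySem.Str.startswith ct qt) =
    (match (PySem.List.sorted corpus_tokens (fun s => s))[PySem.List.bisectLeft (PySem.List.sorted corpus_tokens (fun s => s)) qt]? with
      | some t => PySem.Str.startswith t qt
      | none => false) := by
  set sc := PySem.List.sorted corpus_tokens (fun s => s) with hsc
  have hs : List.Pairwise (· ≤ ·) sc := PySem.List.sorted_pairwise corpus_tokens (fun s => s)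
  obtain ⟨hlen, hbelow, habove⟩ := pv_bisectLoop_spec sc qt hs sc.length 0 sc.length
    (by omega) (le_refl _) (by omega) (by omega) (by omega)
  have hmono : ∀ i j (hi' : i < sc.length) (hj' : j < sc.length), i ≤ j → sc[i] ≤ sc[j] := by
    intro i j hi' hj' hij
    rcases Nat.lt_or_ge i j with h|h
    · exact (List.pairwise_iff_getElem.mp hs) i j hi' hj' h
    · have : i = j := by omega
      subst this; exact le_refl _
  set i := PySem.List.bisectLeftLoop sc qt sc.length 0 sc.length with hi
  have hbl : PySem.List.bisectLeft sc qt = i := rfl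
  rw [hbl]
  have hiff : (corpus_tokens.any (fun ct => PySem.Str.startswith ct qt) = true) ↔
      (∃ (j : Nat) (hj : j < sc.length), PySem.Str.startswith sc[j] qt = true) := by
    simp only [List.any_eq_true]
    constructor
    · rintro ⟨ct, hct, hsw⟩
      have : ct ∈ sc := (PySem.List.mem_sorted corpus_tokens (fun s => s) false ct).mpr hct
      obtain ⟨j, hj, rfl⟩ := List.getElem_of_mem this
      exact ⟨j, hj, hsw⟩
    · rintro ⟨j, hj, hsw⟩
      exact ⟨sc[j], (PySem.List.mem_sorted corpus_tokens (fun s => s) false sc[j]).mp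
        (List.getElem_mem hj), hsw⟩
  by_cases hex : ∃ (j : Nat) (hj : j < sc.length), PySem.Str.startswith sc[j] qt = true
  · obtain ⟨j, hj, hsw⟩ := hex
    have hpre : qt.toList <+: sc[j].toList := by
      rw [PySem.Str.startswith_eq] at hsw
      exact (PySem.Chars.startswith_iff _ _).mp hsw
    have hqle : qt ≤ sc[j] := String.le_iff_toList_le.mpr (pv_prefix_le _ _ hpre)
    have hij : i ≤ j := by
      by_contra hcon
      exact absurd hqle (not_le_of_gt (hbelow j hj (by omega)))
    have hilen : i < sc.length := by omega
    have hswi : PySem.Str.startswith sc[i] qt = true := by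
      rw [PySem.Str.startswith_eq]
      refine (PySem.Chars.startswith_iff _ _).mpr ?_
      exact pv_prefix_of_between qt.toList sc[i].toList sc[j].toList
        (String.le_iff_toList_le.mp (habove i hilen (le_refl _)))
        (String.le_iff_toList_le.mp (hmono i j hilen hj hij)) hpre
    rw [List.getElem?_eq_getElem hilen]
    simp only [hswi]
    exact hiff.mpr ⟨j, hj, hsw⟩
  · have hfalse : corpus_tokens.any (fun ct => PySem.Str.startswith ct qt) = false := by
      cases h : corpus_tokens.any (fun ct => PySem.Str.startswith ct qt)
      · rfl
      · exact absurd (hiff.mp h) hex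
    rw [hfalse]
    rcases Nat.lt_or_ge i sc.length with hilen|hilen
    · rw [List.getElem?_eq_getElem hilen]
      show false = PySem.Str.startswith sc[i] qt
      cases h : PySem.Str.startswith sc[i] qt
      · rfl
      · exact absurd ⟨i, hilen, h⟩ hex
    · rw [List.getElem?_eq_none hilen]

-- q.all of the constantly-false test on a nonempty list
theorem pv_all_false (q : List String) (f : String → Bool) (hq : q.isEmpty = false)
    (hf : ∀ s, f s = false) : q.all f = false := by
  cases q with
  | nil => simp at hq
  | cons a t => simp [hf]

-- ===== VERDICT (by name: the statement is the Claim_ definition above) =====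
theorem match_prefilter_spec : Claim_equal_match_prefilter := by
  intro query_tokens corpus_tokens _
  unfold Spec_match_prefilter match_prefilter match_prefilter_alt
  by_cases hq : query_tokens.isEmpty
  · simp [hq]
  · rw [if_neg hq, if_neg hq]
    by_cases hc : corpus_tokens.isEmpty
    · rw [if_pos hc]
      have hce : corpus_tokens = [] := List.isEmpty_iff.mp hc
      subst hce
      refine (pv_all_false query_tokens _ (by simpa using hq) ?_).symm
      intro qt
      simp [PySem.List.sorted, PySem.List.bisectLeft, PySem.List.bisectLeftLoop]
    · rw [if_neg hc]
      refine congrArg query_tokens.all (funext fun qt => ?_)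
      exact pv_any_eq_probe corpus_tokens qt
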